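-- pv_equiv track=rewrite | github.com/lingyk/Code_Interview | wordCompression.py | wordCompress
-- ===== SOURCE A (Python) =====
-- def wordCompress(word, k):
--     wordComp = []
--
--     for char in word:
--         if wordComp and wordComp[-1][0] == char:
--             wordComp[-1][1] += 1
--             if wordComp[-1][1] == k:
--                 wordComp.pop()
--         else:
--             wordComp.append([char, 1])
--
--     output = ''
--     for char, count in wordComp:
--         output += char * count
--     return output
-- ===== SOURCE B (Python) =====
-- def wordCompress(word, k):
--     # A run's count can only hit k after an increment, so k < 2 can never trigger a removal.
--     if k < 2:
--         return word
--
--     def one_pass(s):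
--         out = []
--         i = 0
--         n = len(s)
--         while i < n:
--             j = i
--             while j < n and s[j] == s[i]:
--                 j += 1
--             out.append(s[i] * ((j - i) % k))
--             i = j
--         return ''.join(out)
--
--     prev = word
--     cur = one_pass(word)
--     while cur != prev:
--         prev, cur = cur, one_pass(cur)
--     return cur
-- ===== Notes on version B (the rewrite author's own statement) =====
-- stated objective: alternative
-- what changed: Replaces A's single-pass stack of (char,count) pairs with a stackless staged algorithm: each pass run-length-encodes the string and keeps every maximal run's length mod k, and the pass is repeated until a fixpoint is reached (k-block deletion is confluent, so the fixpoint equals A's stack result).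
import Mathlib
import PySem

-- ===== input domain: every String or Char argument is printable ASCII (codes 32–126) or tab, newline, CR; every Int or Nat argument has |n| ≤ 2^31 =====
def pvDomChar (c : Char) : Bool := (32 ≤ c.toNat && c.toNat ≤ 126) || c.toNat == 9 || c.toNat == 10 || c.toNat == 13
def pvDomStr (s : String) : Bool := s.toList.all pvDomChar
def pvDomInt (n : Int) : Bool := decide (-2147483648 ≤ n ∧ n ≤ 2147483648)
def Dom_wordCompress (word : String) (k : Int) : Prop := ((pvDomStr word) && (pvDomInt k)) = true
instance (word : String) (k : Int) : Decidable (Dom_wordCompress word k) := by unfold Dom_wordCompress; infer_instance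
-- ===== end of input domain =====

-- B removes k-runs by a different method: repeated run-length-encoding passes that keep each
-- maximal run's length mod k, iterated to a fixpoint — no stack at all (alternative decomposition).


-- ===== PORT A =====
-- A's stack wordComp is kept top-first (Python's wordComp[-1] is the head here).
def wcStepA (k : Int) (st : List (Char × Int)) (ch : Char) : List (Char × Int) :=
  match st with
  | (c, n) :: rest =>
      if c == ch then
        if n + 1 == k then rest else (c, n + 1) :: rest
      else (ch, 1) :: (c, n) :: rest
  | [] => [(ch, 1)]

def wordCompress (word : String) (k : Int) : String :=
  let wordComp := word.toList.foldl (wcStepA k) []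
  -- the output loop walks the stack bottom-to-top, i.e. the reverse of our top-first list
  wordComp.reverse.foldl (fun out p => out ++ String.ofList (List.replicate p.2.toNat p.1)) ""

-- ===== PORT B =====
-- termination facts the port's recursions cite (by name, in decreasing_by)
theorem wcMod_toNat_le (m : Nat) (k : Int) : (PySem.Int.mod (m : Int) k).toNat ≤ m := by
  rcases lt_trichotomy k 0 with hk | hk | hk
  · have h := PySem.Int.mod_neg_bounds (a := (m : Int)) hk
    omega
  · subst hk
    simp [PySem.Int.mod, Int.fmod_zero]
  · rw [PySem.Int.mod_eq_emod_of_pos hk, Int.emod_def]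
    have h1 : 0 ≤ (m : Int) / k := Int.ediv_nonneg (by omega) (by omega)
    have h2 : 0 ≤ k * ((m : Int) / k) := mul_nonneg (by omega) h1
    omega

-- one pass of B: each maximal run of length m is replaced by m % k copies of its character
def wcPass (k : Int) (s : List Char) : List Char :=
  match s with
  | [] => []
  | c :: rest =>
      List.replicate (PySem.Int.mod (((rest.takeWhile (fun x => x == c)).length : Int) + 1) k).toNat c
        ++ wcPass k (rest.dropWhile (fun x => x == c))
termination_by s.length
decreasing_by
  have := List.length_dropWhile_le (fun x => x == c) rest
  simp only [List.length_cons]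
  omega

theorem wcPass_len_le (k : Int) : ∀ (n : Nat) (s : List Char), s.length ≤ n →
    (wcPass k s).length ≤ s.length := by
  intro n
  induction n with
  | zero =>
    intro s hs
    have : s = [] := List.eq_nil_of_length_eq_zero (by omega)
    subst this; simp [wcPass]
  | succ n ih =>
    intro s hs
    match s with
    | [] => simp [wcPass]
    | c :: rest =>
      rw [wcPass]
      have hsplit : (rest.takeWhile (fun x => x == c)).length
          + (rest.dropWhile (fun x => x == c)).length = rest.length := by
        rw [← List.length_append, List.takeWhile_append_dropWhile]
      have hmod : (PySem.Int.mod (((rest.takeWhile (fun x => x == c)).length : Int) + 1) k).toNat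
          ≤ (rest.takeWhile (fun x => x == c)).length + 1 := by
        have := wcMod_toNat_le ((rest.takeWhile (fun x => x == c)).length + 1) k
        push_cast at this ⊢
        omega
      have hrec := ih (rest.dropWhile (fun x => x == c)) (by simp at hs; omega)
      simp only [List.length_append, List.length_replicate, List.length_cons]
      omega

theorem wcPass_eq_of_len (k : Int) : ∀ (n : Nat) (s : List Char), s.length ≤ n →
    (wcPass k s).length = s.length → wcPass k s = s := by
  intro n
  induction n with
  | zero =>
    intro s hs _
    have : s = [] := List.eq_nil_of_length_eq_zero (by omega)
    subst this; simp [wcPass]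
  | succ n ih =>
    intro s hs hlen
    match s with
    | [] => simp [wcPass]
    | c :: rest =>
      rw [wcPass] at hlen ⊢
      have hsplit : (rest.takeWhile (fun x => x == c)).length
          + (rest.dropWhile (fun x => x == c)).length = rest.length := by
        rw [← List.length_append, List.takeWhile_append_dropWhile]
      have hmod : (PySem.Int.mod (((rest.takeWhile (fun x => x == c)).length : Int) + 1) k).toNat
          ≤ (rest.takeWhile (fun x => x == c)).length + 1 := by
        have := wcMod_toNat_le ((rest.takeWhile (fun x => x == c)).length + 1) k
        push_cast at this ⊢
        omega
      have hle := wcPass_len_le k n (rest.dropWhile (fun x => x == c)) (by simp at hs; omega)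
      simp only [List.length_append, List.length_replicate, List.length_cons] at hlen
      have hr : (PySem.Int.mod (((rest.takeWhile (fun x => x == c)).length : Int) + 1) k).toNat
          = (rest.takeWhile (fun x => x == c)).length + 1 := by omega
      have heq : wcPass k (rest.dropWhile (fun x => x == c)) = rest.dropWhile (fun x => x == c) :=
        ih _ (by simp at hs; omega) (by omega)
      rw [hr, heq]
      have hrun : rest.takeWhile (fun x => x == c)
          = List.replicate (rest.takeWhile (fun x => x == c)).length c := by
        apply List.eq_replicate_of_mem
        intro b hb
        have := List.mem_takeWhile_imp (l := rest) (p := fun x => x == c) hb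
        exact eq_of_beq this
      calc List.replicate ((rest.takeWhile (fun x => x == c)).length + 1) c
            ++ rest.dropWhile (fun x => x == c)
          = c :: (List.replicate (rest.takeWhile (fun x => x == c)).length c
            ++ rest.dropWhile (fun x => x == c)) := by rw [List.replicate_succ]; rfl
        _ = c :: (rest.takeWhile (fun x => x == c) ++ rest.dropWhile (fun x => x == c)) := by
            rw [← hrun]
        _ = c :: rest := by rw [List.takeWhile_append_dropWhile]

theorem wcPass_len_lt (k : Int) (s : List Char) (h : ¬ wcPass k s = s) :
    (wcPass k s).length < s.length :=
  lt_of_le_of_ne (wcPass_len_le k s.length s le_rfl)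
    (fun he => h (wcPass_eq_of_len k s.length s le_rfl he))

-- B's while-loop: iterate wcPass until it changes nothing
def wcFix (k : Int) (s : List Char) : List Char :=
  let t := wcPass k s
  if h : t = s then s else wcFix k t
termination_by s.length
decreasing_by exact wcPass_len_lt k s h

def wordCompress_alt (word : String) (k : Int) : String :=
  -- a run's count is checked only after an increment, so it can never equal k when k < 2
  if k < 2 then word else String.ofList (wcFix k word.toList)

-- ===== PRECONDITION & SPEC =====
def Spec_wordCompress (word : String) (k : Int) (out : String) : Prop := out = wordCompress_alt word k
instance (word : String) (k : Int) (out : String) : Decidable (Spec_wordCompress word k out) := by unfold Spec_wordCompress; infer_instance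

-- ===== CLAIM (what is proved, stated in full; the proofs are below) =====
def Claim_equal_wordCompress : Prop := ∀ (word : String) (k : Int), Dom_wordCompress word k → Spec_wordCompress word k (wordCompress word k)

-- ===== LEMMAS AND PROOFS =====

-- flatten A's (top-first) stack; the printed output is its reverse
def wcFlat (st : List (Char × Int)) : List Char :=
  (st.map (fun p => List.replicate p.2.toNat p.1)).flatten

-- A's output loop, as String.ofList of the flattened replicates
theorem wcOut_eq (l : List (Char × Int)) (s : List Char) :
    l.foldl (fun out p => out ++ String.ofList (List.replicate p.2.toNat p.1)) (String.ofList s)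
      = String.ofList (s ++ wcFlat l) := by
  induction l generalizing s with
  | nil => simp [wcFlat]
  | cons q l ih =>
    simp only [List.foldl_cons]
    rw [show String.ofList s ++ String.ofList (List.replicate q.2.toNat q.1)
          = String.ofList (s ++ List.replicate q.2.toNat q.1) by simp, ih]
    simp [wcFlat]

theorem wcFlat_reverse (st : List (Char × Int)) :
    wcFlat st.reverse = (wcFlat st).reverse := by
  induction st with
  | nil => rfl
  | cons q st ih =>
    simp [wcFlat, List.map_append, List.flatten_append] at *
    simp [ih]

theorem wcA_render (word : String) (k : Int) :
    wordCompress word k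
      = String.ofList ((wcFlat (word.toList.foldl (wcStepA k) [])).reverse) := by
  show (word.toList.foldl (wcStepA k) []).reverse.foldl
      (fun out p => out ++ String.ofList (List.replicate p.2.toNat p.1)) ""
      = String.ofList ((wcFlat (word.toList.foldl (wcStepA k) [])).reverse)
  rw [show ("" : String) = String.ofList [] from rfl, wcOut_eq, wcFlat_reverse]
  simp

-- invariant of A's stack: counts in [1, k), adjacent entries carry distinct characters
def wcGood (k : Int) (st : List (Char × Int)) : Prop :=
  (∀ p ∈ st, 1 ≤ p.2 ∧ p.2 < k) ∧ st.IsChain (fun p q => p.1 ≠ q.1)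

theorem wcGood_nil (k : Int) : wcGood k [] := ⟨by simp, List.IsChain.nil⟩

theorem wcGood_step (k : Int) (hk : 2 ≤ k) (st : List (Char × Int)) (ch : Char)
    (h : wcGood k st) : wcGood k (wcStepA k st ch) := by
  obtain ⟨hc, hch⟩ := h
  match st with
  | [] =>
    refine ⟨?_, List.IsChain.singleton _⟩
    intro p hp
    simp only [wcStepA, List.mem_singleton] at hp
    subst hp
    constructor <;> simp <;> omega
  | (c, n) :: rest =>
    rw [wcStepA]
    split_ifs with h1 h2
    · exact ⟨fun p hp => hc p (List.mem_cons_of_mem _ hp), hch.of_cons⟩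
    · have hn := hc (c, n) (by simp)
      simp only at hn
      have hne : n + 1 ≠ k := by
        intro hh; rw [hh] at h2; simp at h2
      refine ⟨?_, ?_⟩
      · intro p hp
        rcases List.mem_cons.mp hp with hp | hp
        · subst hp
          constructor <;> simp <;> omega
        · exact hc p (List.mem_cons_of_mem _ hp)
      · match rest, hch with
        | [], _ => exact List.IsChain.singleton _
        | q :: rest', hch =>
          exact List.isChain_cons_cons.mpr
            ⟨(List.isChain_cons_cons.mp hch).1, (List.isChain_cons_cons.mp hch).2⟩
    · refine ⟨?_, ?_⟩
      · intro p hp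
        rcases List.mem_cons.mp hp with hp | hp
        · subst hp
          constructor <;> simp <;> omega
        · exact hc p hp
      · apply List.isChain_cons_cons.mpr
        refine ⟨?_, hch⟩
        simp only [ne_eq]
        intro hh
        rw [hh] at h1; simp at h1

theorem wcGood_foldl (k : Int) (hk : 2 ≤ k) (l : List Char) (st : List (Char × Int))
    (h : wcGood k st) : wcGood k (l.foldl (wcStepA k) st) := by
  induction l generalizing st with
  | nil => exact h
  | cons c l ih => exact ih _ (wcGood_step k hk st c h)

-- feeding j copies of c onto a stack whose top (if any) carries a different char, j < k
theorem wcGrow (k : Int) (c : Char) (st : List (Char × Int))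
    (hf : ∀ p ∈ st.head?, p.1 ≠ c) :
    ∀ (j : Nat), 1 ≤ j → (j : Int) < k →
      (List.replicate j c).foldl (wcStepA k) st = (c, (j : Int)) :: st := by
  intro j
  induction j with
  | zero => omega
  | succ j ih =>
    intro _ hjk
    by_cases hj : j = 0
    · subst hj
      match st with
      | [] => simp [wcStepA]
      | (d, n) :: rest =>
        have hd : d ≠ c := hf (d, n) (by simp)
        simp only [List.replicate_succ, List.replicate_zero, List.foldl_cons, List.foldl_nil]
        rw [wcStepA]
        rw [if_neg (by simp [hd])]
        norm_num
    · have hrec := ih (by omega) (by push_cast at hjk ⊢; omega)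
      rw [List.replicate_succ', List.foldl_append, hrec]
      simp only [List.foldl_cons, List.foldl_nil]
      rw [wcStepA]
      rw [if_pos (by simp)]
      rw [if_neg (by simp; push_cast at hjk; omega)]
      norm_num

-- feeding j more copies of c onto a top entry (c, t), staying below k
theorem wcGrowTop (k : Int) (c : Char) (t : Int) (rest : List (Char × Int)) :
    ∀ (j : Nat), t + (j : Int) < k →
      (List.replicate j c).foldl (wcStepA k) ((c, t) :: rest) = (c, t + (j : Int)) :: rest := by
  intro j
  induction j with
  | zero => simp
  | succ j ih =>
    intro hjk
    have hrec := ih (by push_cast at hjk ⊢; omega)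
    rw [List.replicate_succ', List.foldl_append, hrec]
    simp only [List.foldl_cons, List.foldl_nil]
    rw [wcStepA]
    rw [if_pos (by simp)]
    rw [if_neg (by simp; push_cast at hjk; omega)]
    push_cast
    ring_nf

-- a full block of k equal characters leaves any good stack unchanged
theorem wcFeedK (k : Int) (hk : 2 ≤ k) (c : Char) (st : List (Char × Int)) (hg : wcGood k st) :
    (List.replicate k.toNat c).foldl (wcStepA k) st = st := by
  match st with
  | [] =>
    have h1 : k.toNat = (k.toNat - 1) + 1 := by omega
    rw [h1, List.replicate_succ', List.foldl_append,
      wcGrow k c [] (by simp) (k.toNat - 1) (by omega) (by omega)]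
    simp only [List.foldl_cons, List.foldl_nil]
    rw [wcStepA, if_pos (by simp), if_pos (by simp; omega)]
  | (d, t) :: rest =>
    by_cases hd : d = c
    · subst hd
      have ht := hg.1 (d, t) (by simp)
      simp only at ht
      have hT : t = ((t.toNat : Nat) : Int) := by omega
      have hsplit : k.toNat = (k.toNat - t.toNat) + t.toNat := by omega
      rw [hsplit, List.replicate_add, List.foldl_append]
      have h1 : k.toNat - t.toNat = (k.toNat - t.toNat - 1) + 1 := by omega
      rw [h1, List.replicate_succ', List.foldl_append,
        wcGrowTop k d t rest (k.toNat - t.toNat - 1) (by omega)]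
      simp only [List.foldl_cons, List.foldl_nil]
      rw [wcStepA, if_pos (by simp), if_pos (by simp; omega)]
      have hfresh : ∀ p ∈ rest.head?, p.1 ≠ d := by
        intro p hp
        have hch := hg.2
        match rest, hp with
        | q :: rest', hp =>
          simp at hp
          subst hp
          exact (List.isChain_cons_cons.mp hch).1.symm
      by_cases ht0 : t.toNat = 0
      · omega
      · rw [wcGrow k d rest hfresh t.toNat (by omega) (by omega), ← hT]
    · have h1 : k.toNat = (k.toNat - 1) + 1 := by omega
      rw [h1, List.replicate_succ', List.foldl_append,
        wcGrow k c ((d, t) :: rest) (by simp [hd]) (k.toNat - 1) (by omega) (by omega)]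
      simp only [List.foldl_cons, List.foldl_nil]
      rw [wcStepA, if_pos (by simp), if_pos (by simp; omega)]

-- q full blocks of k equal characters leave any good stack unchanged
theorem wcFeedKMul (k : Int) (hk : 2 ≤ k) (c : Char) (st : List (Char × Int)) (hg : wcGood k st) :
    ∀ (q : Nat), (List.replicate (k.toNat * q) c).foldl (wcStepA k) st = st := by
  intro q
  induction q with
  | zero => simp
  | succ q ih =>
    rw [Nat.mul_succ, List.replicate_add, List.foldl_append, ih, wcFeedK k hk c st hg]

-- a run of length m feeds the stack exactly like a run of length m % k
theorem wcRunReduce (k : Int) (hk : 2 ≤ k) (c : Char) (st : List (Char × Int)) (hg : wcGood k st)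
    (m : Nat) :
    (List.replicate m c).foldl (wcStepA k) st
      = (List.replicate (m % k.toNat) c).foldl (wcStepA k) st := by
  have hm : m = m % k.toNat + k.toNat * (m / k.toNat) := by
    rw [Nat.mod_add_div]
  conv_lhs => rw [hm]
  rw [List.replicate_add, List.foldl_append]
  rw [wcFeedKMul k hk c _ (wcGood_foldl k hk _ st hg) (m / k.toNat)]

theorem wcHead_dropWhile (p : Char → Bool) :
    ∀ (l : List Char) (d : Char), (l.dropWhile p).head? = some d → p d = false := by
  intro l
  induction l with
  | nil => intro d h; simp at h
  | cons a l ih =>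
    intro d h
    rw [List.dropWhile_cons] at h
    split at h
    · exact ih d h
    · simp at h; subst h; simp_all

-- rewrite mod over k ≥ 2 into Nat mod
theorem wcMod_nat (k : Int) (hk : 2 ≤ k) (m : Nat) :
    (PySem.Int.mod (m : Int) k).toNat = m % k.toNat := by
  obtain ⟨K, rfl⟩ : ∃ K : Nat, k = (K : Int) := ⟨k.toNat, by omega⟩
  rw [PySem.Int.mod_natCast]
  rw [Int.toNat_natCast, Int.toNat_natCast]

-- one wcPass does not change what A's fold computes from a good stack
theorem wcPass_fold (k : Int) (hk : 2 ≤ k) :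
    ∀ (n : Nat) (s : List Char), s.length ≤ n → ∀ (st : List (Char × Int)), wcGood k st →
      (wcPass k s).foldl (wcStepA k) st = s.foldl (wcStepA k) st := by
  intro n
  induction n with
  | zero =>
    intro s hs st _
    have : s = [] := List.eq_nil_of_length_eq_zero (by omega)
    subst this; simp [wcPass]
  | succ n ih =>
    intro s hs st hg
    match s with
    | [] => simp [wcPass]
    | c :: rest =>
      have hsplit : (rest.takeWhile (fun x => x == c)).length
          + (rest.dropWhile (fun x => x == c)).length = rest.length := by
        rw [← List.length_append, List.takeWhile_append_dropWhile]
      have hrun : rest.takeWhile (fun x => x == c)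
          = List.replicate (rest.takeWhile (fun x => x == c)).length c := by
        apply List.eq_replicate_of_mem
        intro b hb
        exact eq_of_beq (List.mem_takeWhile_imp (l := rest) (p := fun x => x == c) hb)
      have hs_split : c :: rest
          = List.replicate ((rest.takeWhile (fun x => x == c)).length + 1) c
            ++ rest.dropWhile (fun x => x == c) := by
        rw [List.replicate_succ]
        simp only [List.cons_append]
        rw [← hrun, List.takeWhile_append_dropWhile]
      rw [wcPass]
      have hmodc : (PySem.Int.mod (((rest.takeWhile (fun x => x == c)).length : Int) + 1) k).toNat
          = ((rest.takeWhile (fun x => x == c)).length + 1) % k.toNat := by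
        have := wcMod_nat k hk ((rest.takeWhile (fun x => x == c)).length + 1)
        push_cast at this ⊢
        omega
      rw [hmodc, List.foldl_append]
      rw [ih (rest.dropWhile (fun x => x == c)) (by simp at hs; omega) _
        (wcGood_foldl k hk _ st hg)]
      conv_rhs => rw [hs_split]
      rw [List.foldl_append]
      rw [wcRunReduce k hk c st hg ((rest.takeWhile (fun x => x == c)).length + 1)]

-- on a fixpoint of wcPass, A's fold just stacks the runs and flattens back to the input
theorem wcFix_fold (k : Int) (hk : 2 ≤ k) :
    ∀ (n : Nat) (s : List Char), s.length ≤ n → wcPass k s = s →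
      ∀ (st : List (Char × Int)), wcGood k st →
      (∀ p ∈ st.head?, ∀ d ∈ s.head?, p.1 ≠ d) →
      wcFlat (s.foldl (wcStepA k) st) = s.reverse ++ wcFlat st := by
  intro n
  induction n with
  | zero =>
    intro s hs _ st _ _
    have : s = [] := List.eq_nil_of_length_eq_zero (by omega)
    subst this; simp
  | succ n ih =>
    intro s hs hfix st hg hfr
    match s with
    | [] => simp
    | c :: rest =>
      have hsplit : (rest.takeWhile (fun x => x == c)).length
          + (rest.dropWhile (fun x => x == c)).length = rest.length := by
        rw [← List.length_append, List.takeWhile_append_dropWhile]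
      have hrun : rest.takeWhile (fun x => x == c)
          = List.replicate (rest.takeWhile (fun x => x == c)).length c := by
        apply List.eq_replicate_of_mem
        intro b hb
        exact eq_of_beq (List.mem_takeWhile_imp (l := rest) (p := fun x => x == c) hb)
      set run := rest.takeWhile (fun x => x == c) with hrundef
      set rest' := rest.dropWhile (fun x => x == c) with hrest'def
      set m := run.length + 1 with hmdef
      -- from the fixpoint property: the first run survives whole, and the tail is a fixpoint
      rw [wcPass] at hfix
      have hmodc : (PySem.Int.mod ((run.length : Int) + 1) k).toNat = m % k.toNat := by
        have := wcMod_nat k hk m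
        push_cast [hmdef] at this ⊢
        omega
      rw [hmodc] at hfix
      rw [← hrest'def] at hfix
      have hlenfix := congrArg List.length hfix
      simp only [List.length_append, List.length_replicate, List.length_cons] at hlenfix
      have hle := wcPass_len_le k rest'.length rest' le_rfl
      have hmle : m % k.toNat ≤ m := Nat.mod_le _ _
      have hrm : m % k.toNat = m := by omega
      have hfix' : wcPass k rest' = rest' :=
        wcPass_eq_of_len k rest'.length rest' le_rfl (by omega)
      have hmk : m < k.toNat := by
        have := Nat.mod_lt m (y := k.toNat) (by omega)
        omega
      have hs_split : c :: rest = List.replicate m c ++ rest' := by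
        rw [hmdef, List.replicate_succ]
        simp only [List.cons_append]
        rw [← hrun, hrest'def, List.takeWhile_append_dropWhile]
      -- feed the first run: the stack grows by (c, m)
      have hgrow : (List.replicate m c).foldl (wcStepA k) st = (c, (m : Int)) :: st := by
        apply wcGrow k c st _ m (by omega) (by omega)
        intro p hp
        exact hfr p hp c (by simp)
      -- recurse on the tail
      have hg' : wcGood k ((c, (m : Int)) :: st) := by
        constructor
        · intro p hp
          rcases List.mem_cons.mp hp with hp | hp
          · subst hp; simp; omega
          · exact hg.1 p hp
        · match st, hfr with
          | [], _ => exact List.IsChain.singleton _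
          | q :: st', hfr =>
            exact List.isChain_cons_cons.mpr
              ⟨fun hh => hfr q (by simp) c (by simp) hh.symm, hg.2⟩
      have hfr' : ∀ p ∈ ((c, (m : Int)) :: st).head?, ∀ d ∈ rest'.head?, p.1 ≠ d := by
        intro p hp d hd
        simp at hp
        subst hp
        simp only
        intro hh
        have := wcHead_dropWhile (fun x => x == c) rest d hd
        rw [← hh] at this
        simp at this
      have hrec := ih rest' (by simp at hs; omega) hfix' ((c, (m : Int)) :: st) hg' hfr'
      conv_lhs => rw [hs_split]
      rw [List.foldl_append, hgrow, hrec]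
      have hflatc : wcFlat ((c, (m : Int)) :: st) = List.replicate m c ++ wcFlat st := by
        simp [wcFlat]
      rw [hflatc, hs_split]
      simp [List.reverse_append]
  
-- k ≥ 2: A's rendered stack equals B's fixpoint iteration
theorem wcMain (k : Int) (hk : 2 ≤ k) :
    ∀ (n : Nat) (s : List Char), s.length ≤ n →
      (wcFlat (s.foldl (wcStepA k) [])).reverse = wcFix k s := by
  intro n
  induction n with
  | zero =>
    intro s hs
    have : s = [] := List.eq_nil_of_length_eq_zero (by omega)
    subst this
    rw [wcFix]
    simp [wcFlat, wcPass]
  | succ n ih =>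
    intro s hs
    rw [wcFix]
    by_cases hfix : wcPass k s = s
    · rw [dif_pos hfix]
      rw [wcFix_fold k hk s.length s le_rfl hfix [] (wcGood_nil k) (by simp)]
      simp [wcFlat]
    · rw [dif_neg hfix]
      have hlt := wcPass_len_lt k s hfix
      rw [← wcPass_fold k hk s.length s le_rfl [] (wcGood_nil k)]
      exact ih (wcPass k s) (by omega)

-- k < 2: A never pops, the stack flattens back to the input
theorem wcLow (k : Int) (hk : k < 2) :
    ∀ (s : List Char) (st : List (Char × Int)), (∀ p ∈ st, 1 ≤ p.2) →
      wcFlat (s.foldl (wcStepA k) st) = s.reverse ++ wcFlat st := by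
  intro s
  induction s with
  | nil => simp
  | cons c rest ih =>
    intro st hc
    simp only [List.foldl_cons]
    have hstep : wcFlat (wcStepA k st c) = c :: wcFlat st ∧ ∀ p ∈ wcStepA k st c, 1 ≤ p.2 := by
      match st with
      | [] => refine ⟨by simp [wcStepA, wcFlat], by simp [wcStepA]⟩
      | (d, t) :: rest' =>
        have ht := hc (d, t) (by simp)
        simp only at ht
        rw [wcStepA]
        split_ifs with h1 h2
        · exfalso
          have : t + 1 = k := by simpa using h2
          omega
        · have hd : d = c := by simpa using h1
          subst hd
          constructor
          · have htn : (t + 1).toNat = t.toNat + 1 := by omega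
            simp only [wcFlat, List.map_cons, List.flatten_cons]
            rw [htn, List.replicate_succ]
            rfl
          · intro p hp
            rcases List.mem_cons.mp hp with hp | hp
            · subst hp; simp; omega
            · exact hc p (List.mem_cons_of_mem _ hp)
        · constructor
          · simp [wcFlat]
          · intro p hp
            rcases List.mem_cons.mp hp with hp | hp
            · subst hp; simp
            · exact hc p hp
    rw [ih _ hstep.2, hstep.1]
    simp

-- ===== VERDICT (by name: the statement is the Claim_ definition above) =====
theorem wordCompress_spec : Claim_equal_wordCompress := by
  intro word k _
  show wordCompress word k = wordCompress_alt word k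
  rw [wcA_render, wordCompress_alt]
  by_cases hk : k < 2
  · rw [if_pos hk]
    rw [wcLow k hk word.toList [] (by simp)]
    simp [wcFlat]
  · rw [if_neg hk]
    rw [wcMain k (by omega) word.toList.length word.toList le_rfl]
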